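-- pv_equiv track=rewrite | github.com/ts1/PiIR | piir/decode.py | split_pulses
-- ===== SOURCE A (Python) =====
-- def split_pulses(pulses, min_gap, min_pulses):
--     parts = []
--     part = []
--     gaps = []
--
--     for i, pulse in enumerate(pulses):
--         if (i & 1) and pulse >= min_gap:
--             gaps.append(pulse)
--             if len(part) >= min_pulses:
--                 parts.append(part)
--             part = []
--         else:
--             part.append(pulse)
--     if len(part) >= min_pulses:
--         parts.append(part)
--
--     if gaps:
--         gap = sorted(gaps)[len(gaps) // 2]
--     else:
--         gap = None
--
--     return parts, gap
-- ===== SOURCE B (Python) =====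
-- def split_pulses(pulses, min_gap, min_pulses):
--     # Two staged passes over indices: locate the gap positions first, then slice
--     # the stream between consecutive gap boundaries; no accumulator loop.
--     n = len(pulses)
--     hits = [(i, p) for i, p in enumerate(pulses) if i % 2 == 1 and p >= min_gap]
--     bounds = [-1] + [i for i, _ in hits] + [n]
--     parts = [pulses[a + 1:b] for a, b in zip(bounds, bounds[1:]) if b - a - 1 >= min_pulses]
--     gaps = sorted(p for _, p in hits)
--     return parts, gaps[len(gaps) // 2] if gaps else None
-- ===== Notes on version B (the rewrite author's own statement) =====
-- stated objective: alternative
-- what changed: A's single accumulator loop that flushes and filters segments inline is replaced by an index-based staged computation: first locate the gap positions, then form boundary pairs [-1]+G+[n] and slice the stream between consecutive boundaries (keeping slices with b-a-1 >= min_pulses), with the median taken from the sorted gap values; no accumulator loop at all.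
import Mathlib
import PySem

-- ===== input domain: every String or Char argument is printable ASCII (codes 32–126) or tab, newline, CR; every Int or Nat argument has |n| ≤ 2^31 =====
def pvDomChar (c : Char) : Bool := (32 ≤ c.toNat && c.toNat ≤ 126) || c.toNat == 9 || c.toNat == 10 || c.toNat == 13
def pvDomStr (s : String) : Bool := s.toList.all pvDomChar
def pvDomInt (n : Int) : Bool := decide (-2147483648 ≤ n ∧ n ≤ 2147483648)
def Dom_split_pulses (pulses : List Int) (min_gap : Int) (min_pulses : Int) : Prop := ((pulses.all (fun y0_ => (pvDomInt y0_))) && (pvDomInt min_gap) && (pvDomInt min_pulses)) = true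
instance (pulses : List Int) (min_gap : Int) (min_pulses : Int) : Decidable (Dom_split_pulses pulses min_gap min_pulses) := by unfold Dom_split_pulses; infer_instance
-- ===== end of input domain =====

-- B replaces A's accumulator-flush loop by an index-based staged computation: gap positions, boundary pairs, slices between consecutive boundaries (objective: alternative decomposition, same cost).

-- ===== PORT A =====
-- the loop body of A: state (parts, part, gaps), element (i, pulse)
def pvStepA (min_gap min_pulses : Int) (st : List (List Int) × List Int × List Int)
    (ip : Int × Int) : List (List Int) × List Int × List Int :=
  if (ip.1 % 2 == 1) && decide (ip.2 ≥ min_gap) then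
    (if decide ((st.2.1.length : Int) ≥ min_pulses) then st.1 ++ [st.2.1] else st.1,
     [], st.2.2 ++ [ip.2])
  else (st.1, st.2.1 ++ [ip.2], st.2.2)

def split_pulses (pulses : List Int) (min_gap : Int) (min_pulses : Int) :
    List (List Int) × Option Int :=
  let st := (PySem.List.enumerate pulses 0).foldl (pvStepA min_gap min_pulses) ([], [], [])
  let parts := if decide ((st.2.1.length : Int) ≥ min_pulses) then st.1 ++ [st.2.1] else st.1
  let gaps := st.2.2
  (parts, if gaps.isEmpty then none else (PySem.List.sorted gaps id false)[gaps.length / 2]?)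

-- ===== PORT B =====
def split_pulses_alt (pulses : List Int) (min_gap : Int) (min_pulses : Int) :
    List (List Int) × Option Int :=
  let n : Int := pulses.length
  let hits := (PySem.List.enumerate pulses 0).filter
    (fun ip => (PySem.Int.mod ip.1 2 == 1) && decide (ip.2 ≥ min_gap))
  let bounds : List Int := [-1] ++ hits.map (·.1) ++ [n]
  let parts := (bounds.zip bounds.tail).filterMap
    (fun ab => if decide (ab.2 - ab.1 - 1 ≥ min_pulses)
               then some (PySem.List.slice pulses (some (ab.1 + 1)) (some ab.2)) else none)
  let gaps := PySem.List.sorted (hits.map (·.2)) id false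
  (parts, if gaps.isEmpty then none else gaps[gaps.length / 2]?)

-- ===== PRECONDITION & SPEC =====
def Spec_split_pulses (pulses : List Int) (min_gap : Int) (min_pulses : Int) (out : List (List Int) × Option Int) : Prop := out = split_pulses_alt pulses min_gap min_pulses
instance (pulses : List Int) (min_gap : Int) (min_pulses : Int) (out : List (List Int) × Option Int) : Decidable (Spec_split_pulses pulses min_gap min_pulses out) := by unfold Spec_split_pulses; infer_instance

-- ===== CLAIM (what is proved, stated in full; the proofs are below) =====
def Claim_equal_split_pulses : Prop := ∀ (pulses : List Int) (min_gap : Int) (min_pulses : Int), Dom_split_pulses pulses min_gap min_pulses → Spec_split_pulses pulses min_gap min_pulses (split_pulses pulses min_gap min_pulses)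

-- ===== LEMMAS AND PROOFS =====

-- the gap test of both programs on an enumerated pair
def pvFlag (min_gap : Int) (ip : Int × Int) : Bool :=
  (ip.1 % 2 == 1) && decide (ip.2 ≥ min_gap)

-- the raw segments A's accumulator loop produces from an enumerated tail, given the open segment s
def pvSegs (min_gap : Int) (s : List Int) : List (Int × Int) → List (List Int)
  | [] => [s]
  | ip :: t => if pvFlag min_gap ip then s :: pvSegs min_gap [] t
               else pvSegs min_gap (s ++ [ip.2]) t

-- B's slice-or-drop of one boundary pair
def pvF (min_pulses : Int) (pulses : List Int) (ab : Int × Int) : Option (List Int) :=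
  if decide (ab.2 - ab.1 - 1 ≥ min_pulses)
  then some (PySem.List.slice pulses (some (ab.1 + 1)) (some ab.2)) else none

-- B's zip-of-consecutive-boundaries comprehension, in recursive form
def pvChain (f : Int × Int → Option (List Int)) : Int → List Int → List (List Int)
  | _, [] => []
  | a, b :: t => (f (a, b)).toList ++ pvChain f b t

theorem pvChain_nil (f : Int × Int → Option (List Int)) (a : Int) :
    pvChain f a [] = [] := rfl

theorem pvChain_cons (f : Int × Int → Option (List Int)) (a b : Int) (t : List Int) :
    pvChain f a (b :: t) = (f (a, b)).toList ++ pvChain f b t := rfl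

-- A's fold against raw-segments + gap values
theorem pvA_inv (min_gap min_pulses : Int) (l : List (Int × Int)) :
    ∀ (parts : List (List Int)) (part : List Int) (gaps : List Int),
      (let st := l.foldl (pvStepA min_gap min_pulses) (parts, part, gaps);
       ((if decide ((st.2.1.length : Int) ≥ min_pulses) then st.1 ++ [st.2.1] else st.1), st.2.2))
      =
      (parts ++ (pvSegs min_gap part l).filter (fun s => decide ((s.length : Int) ≥ min_pulses)),
       gaps ++ (l.filter (pvFlag min_gap)).map (·.2)) := by
  induction l with
  | nil =>
    intro parts part gaps
    simp only [List.foldl_nil, List.filter_nil, List.map_nil, List.append_nil]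
    by_cases h : decide ((part.length : Int) ≥ min_pulses) = true <;>
      simp [pvSegs, List.filter, h]
  | cons ip rest ih =>
    intro parts part gaps
    by_cases h : pvFlag min_gap ip = true
    · have hA : pvStepA min_gap min_pulses (parts, part, gaps) ip =
          ((if decide ((part.length : Int) ≥ min_pulses) then parts ++ [part] else parts),
           [], gaps ++ [ip.2]) := by
        simp only [pvFlag] at h; simp only [pvStepA]; rw [if_pos h]
      simp only [List.foldl_cons, hA, ih, pvSegs, h, if_pos]
      by_cases hp : decide ((part.length : Int) ≥ min_pulses) = true <;>
        simp [List.filter, h, hp]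
    · have hA : pvStepA min_gap min_pulses (parts, part, gaps) ip =
          (parts, part ++ [ip.2], gaps) := by
        simp only [pvFlag] at h; simp only [pvStepA]; rw [if_neg h]
      simp only [List.foldl_cons, hA, ih, pvSegs, h]
      simp [List.filter, h]

-- the zip-of-consecutive-elements comprehension is pvChain
theorem pvZipConsec (f : Int × Int → Option (List Int)) :
    ∀ (l : List Int) (a : Int), ((a :: l).zip l).filterMap f = pvChain f a l := by
  intro l
  induction l with
  | nil => intro a; simp [pvChain]
  | cons b t ih =>
    intro a
    cases hf : f (a, b) <;> simp [pvChain, hf, ih b]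

-- main bridge: filtered raw segments of the suffix from `start` (open segment = pulses[segstart:start])
-- equal B's chain of slices over the gap indices of that suffix plus the final boundary
theorem pvMain (min_gap min_pulses : Int) (pulses : List Int) :
    ∀ (k start segstart : Nat), pulses.length - start = k → segstart ≤ start → start ≤ pulses.length →
      (pvSegs min_gap ((pulses.drop segstart).take (start - segstart))
          (PySem.List.enumerate (pulses.drop start) start)).filter
            (fun s => decide ((s.length : Int) ≥ min_pulses))
      = pvChain (pvF min_pulses pulses) ((segstart : Int) - 1)
          ((((PySem.List.enumerate (pulses.drop start) start).filter (pvFlag min_gap)).map (·.1))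
            ++ [(pulses.length : Int)]) := by
  intro k
  induction k with
  | zero =>
    intro start segstart hk hss hsn
    have hstart : start = pulses.length := by omega
    subst hstart
    have hs_len : ((pulses.drop segstart).take (pulses.length - segstart)).length
        = pulses.length - segstart := by simp
    have e1 : (segstart : Int) - 1 + 1 = ((segstart : Nat) : Int) := by ring
    simp only [List.drop_length, PySem.List.enumerate_nil, List.filter_nil, List.map_nil,
      List.nil_append, pvSegs, pvChain_cons, pvChain_nil, pvF, List.append_nil]
    rw [e1, PySem.List.slice_natCast]
    have hcast : ((pulses.length - segstart : Nat) : Int)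
        = (pulses.length : Int) - (segstart : Int) := by omega
    by_cases h : (pulses.length : Int) - ((segstart : Int) - 1) - 1 ≥ min_pulses
    · rw [if_pos (decide_eq_true h), List.filter_cons,
        if_pos (by rw [hs_len, decide_eq_true_eq, hcast]; omega)]
      simp [List.filter]
    · rw [if_neg (by simpa using h), List.filter_cons,
        if_neg (by rw [hs_len, decide_eq_true_eq, hcast]; omega)]
      simp [List.filter]
  | succ k ih =>
    intro start segstart hk hss hsn
    have hlt : start < pulses.length := by omega
    rw [List.drop_eq_getElem_cons hlt, PySem.List.enumerate_cons]
    by_cases hf : pvFlag min_gap ((start : Nat), pulses[start]) = true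
    · have ihh := ih (start + 1) (start + 1) (by omega) (le_refl _) (by omega)
      simp only [Nat.sub_self, List.take_zero] at ihh
      push_cast at ihh
      rw [show (start : Int) + 1 - 1 = (start : Int) by ring] at ihh
      simp only [pvSegs]
      rw [if_pos hf, List.filter_cons, List.filter_cons, if_pos hf, List.map_cons,
        List.cons_append, pvChain_cons]
      simp only [ihh, pvF]
      have e1 : (segstart : Int) - 1 + 1 = ((segstart : Nat) : Int) := by ring
      rw [e1, PySem.List.slice_natCast]
      have hs_len : ((pulses.drop segstart).take (start - segstart)).length
          = start - segstart := by simp; omega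
      have hcast : ((start - segstart : Nat) : Int)
          = (start : Int) - (segstart : Int) := by omega
      by_cases h : (start : Int) - ((segstart : Int) - 1) - 1 ≥ min_pulses
      · rw [if_pos (show decide (((((pulses.drop segstart).take (start - segstart)).length : Nat) : Int) ≥ min_pulses) = true by
            rw [hs_len, decide_eq_true_eq, hcast]; omega),
          if_pos (decide_eq_true h)]
        simp
      · rw [if_neg (show ¬ decide (((((pulses.drop segstart).take (start - segstart)).length : Nat) : Int) ≥ min_pulses) = true by
            rw [hs_len, decide_eq_true_eq, hcast]; omega),
          if_neg (by simpa using h)]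
        simp
    · have hext : (pulses.drop segstart).take (start - segstart) ++ [pulses[start]]
          = (pulses.drop segstart).take (start + 1 - segstart) := by
        rw [show start + 1 - segstart = (start - segstart) + 1 by omega, List.take_add_one,
          List.getElem?_drop, show segstart + (start - segstart) = start by omega,
          List.getElem?_eq_getElem hlt]
        simp
      have ihh := ih (start + 1) segstart (by omega) (by omega) (by omega)
      push_cast at ihh
      simp only [pvSegs]
      rw [if_neg hf, hext, List.filter_cons, if_neg hf]
      exact ihh

-- ===== VERDICT (by name: the statement is the Claim_ definition above) =====
theorem split_pulses_spec : Claim_equal_split_pulses := by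
  intro pulses min_gap min_pulses _
  show split_pulses pulses min_gap min_pulses = split_pulses_alt pulses min_gap min_pulses
  have hflag : (fun ip : Int × Int => (PySem.Int.mod ip.1 2 == 1) && decide (ip.2 ≥ min_gap))
      = pvFlag min_gap := by
    funext ip
    simp [pvFlag]
  have hg : ∀ (g : List Int),
      (if g.isEmpty = true then (none : Option Int)
       else (PySem.List.sorted g id false)[g.length / 2]?)
      = (if (PySem.List.sorted g id false).isEmpty = true then none
         else (PySem.List.sorted g id false)[(PySem.List.sorted g id false).length / 2]?) := by
    intro g
    cases g with
    | nil => simp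
    | cons x t =>
      have h1 : (PySem.List.sorted (x :: t) id false).length = (x :: t).length :=
        PySem.List.length_sorted _ _ _
      have h2 : (PySem.List.sorted (x :: t) id false).isEmpty = false := by
        cases hs : PySem.List.sorted (x :: t) id false with
        | nil => rw [hs] at h1; simp at h1
        | cons a b => simp
      simp [h2, h1]
  have hA := pvA_inv min_gap min_pulses (PySem.List.enumerate pulses 0) [] [] []
  simp only [List.nil_append] at hA
  rw [Prod.mk.injEq] at hA
  have hM := pvMain min_gap min_pulses pulses pulses.length 0 0 (by omega) (by omega) (by omega)
  simp only [List.drop_zero, Nat.sub_self, List.take_zero, Nat.cast_zero, zero_sub] at hM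
  simp only [split_pulses, split_pulses_alt, hflag]
  rw [hA.1, hA.2, hM]
  rw [show ([-1] ++ ((PySem.List.enumerate pulses 0).filter (pvFlag min_gap)).map (·.1)
        ++ [(pulses.length : Int)] : List Int)
      = (-1 : Int) :: (((PySem.List.enumerate pulses 0).filter (pvFlag min_gap)).map (·.1)
        ++ [(pulses.length : Int)]) by simp]
  rw [List.tail_cons, pvZipConsec, hg]
  rfl
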